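-- pv_equiv track=rewrite | github.com/mlz-ictrl/nicos | nicos_mlz/spheres/utils.py | getClosestApproximation
-- ===== SOURCE A (Python) =====
-- def getClosestApproximation(total, interval, subcount=1):
--     if interval == 0:
--         return total, 1
--
--     try:
--         fileinterval = interval*subcount
--
--         filecount = int(total/fileinterval)
--         newinterval = int(total/filecount)
--     except ZeroDivisionError:
--         return getClosestApproximation(total, interval-1, subcount)
--
--     if total-newinterval*filecount > filecount/2:
--         filecount += 1
--
--     newinterval = int(newinterval/subcount)
--
--     return newinterval*filecount*subcount, newinterval
-- ===== SOURCE B (Python) =====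
-- # Closed-form: jump straight to the first interval with a nonzero file count
-- # instead of decrementing one step at a time (O(1) instead of O(interval)).
--
-- def getClosestApproximation(total, interval, subcount=1):
--     if interval > 0 and subcount:
--         # largest interval not exceeding the requested one whose file count is nonzero
--         interval = min(interval, abs(total) // abs(subcount))
--     fileinterval = interval * subcount
--     filecount = int(total / fileinterval) if fileinterval else 0
--     if filecount == 0:
--         return total, 1
--     newinterval = int(total / filecount)
--     if total - newinterval * filecount > filecount / 2:
--         filecount += 1
--     newinterval = int(newinterval / subcount)
--     return newinterval * filecount * subcount, newinterval
-- ===== Notes on version B (the rewrite author's own statement) =====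
-- stated objective: faster
-- what changed: Replaced A's one-step-at-a-time decrement recursion (retrying with interval-1 on every ZeroDivisionError) with a direct closed-form jump to the first interval whose file count is nonzero, min(interval, abs(total)//abs(subcount)); Pre_ excludes only the inputs on which A's unit-decrement recursion overruns CPython's recursion limit (it raises RecursionError at about 998 decrements; the bound 950 leaves a small safety margin for the caller's stack depth, so a narrow band of still-returning inputs is excluded with it), and the negative-interval inputs on which A recurses forever.
-- outside the precondition, e.g. on getClosestApproximation(0, 955, 1): A returns (0, 1), B returns (0, 1)
import Mathlib
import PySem

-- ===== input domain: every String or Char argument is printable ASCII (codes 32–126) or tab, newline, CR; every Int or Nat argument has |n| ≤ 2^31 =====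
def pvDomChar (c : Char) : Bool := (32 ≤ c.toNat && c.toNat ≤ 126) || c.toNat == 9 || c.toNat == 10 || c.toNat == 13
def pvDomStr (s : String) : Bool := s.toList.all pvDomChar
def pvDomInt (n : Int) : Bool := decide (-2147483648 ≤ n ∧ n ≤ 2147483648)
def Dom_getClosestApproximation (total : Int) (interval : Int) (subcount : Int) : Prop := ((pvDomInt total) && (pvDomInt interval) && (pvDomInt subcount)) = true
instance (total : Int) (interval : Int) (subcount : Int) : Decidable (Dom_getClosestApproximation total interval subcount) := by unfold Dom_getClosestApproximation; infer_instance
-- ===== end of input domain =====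

-- B replaces A's one-step-at-a-time decrement recursion by a direct O(1) jump to the
-- first workable interval (objective: faster, asymptotic).
-- Python notes, exact on Dom (|int| ≤ 2^31): `int(x/y)` on these magnitudes equals
-- truncating integer division (the float quotient never rounds across an integer
-- boundary), ported as Int.tdiv; `a > b/2` on ints equals `2*a > b` (b/2 is an exact
-- float), ported that way.

-- ===== PORT A =====
-- fuel makes A's decrement recursion total in Lean: for interval ≥ 0 the Python
-- recursion performs at most interval decrements, so fuel = interval.toNat is never
-- exhausted on inputs where Python returns (the fuel-0 branch is unreachable inside Pre_).
def pvAGo (total subcount : Int) : Int → Nat → Int × Int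
  | interval, fuel =>
    if interval = 0 then (total, 1)
    else
      let fileinterval := interval * subcount
      if fileinterval = 0 then
        -- ZeroDivisionError at `int(total/fileinterval)` → recursive call with interval-1
        match fuel with
        | 0 => (total, 1)
        | f+1 => pvAGo total subcount (interval - 1) f
      else
        let filecount := total.tdiv fileinterval      -- int(total/fileinterval)
        if filecount = 0 then
          -- ZeroDivisionError at `int(total/filecount)` → recursive call with interval-1
          match fuel with
          | 0 => (total, 1)
          | f+1 => pvAGo total subcount (interval - 1) f
        else
          let newinterval := total.tdiv filecount     -- int(total/filecount)
          let filecount' := if 2 * (total - newinterval * filecount) > filecount then filecount + 1 else filecount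
          let ni := newinterval.tdiv subcount         -- int(newinterval/subcount)
          (ni * filecount' * subcount, ni)

def getClosestApproximation (total : Int) (interval : Int) (subcount : Int) : Int × Int :=
  pvAGo total subcount interval interval.toNat

-- ===== PORT B =====
-- pvBBody is the straight-line part of Source B after the jump (fileinterval onwards)
def pvBBody (total subcount j : Int) : Int × Int :=
  let fileinterval := j * subcount
  let filecount := if fileinterval ≠ 0 then total.tdiv fileinterval else 0
  if filecount = 0 then (total, 1)
  else
    let newinterval := total.tdiv filecount
    let filecount' := if 2 * (total - newinterval * filecount) > filecount then filecount + 1 else filecount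
    let ni := newinterval.tdiv subcount
    (ni * filecount' * subcount, ni)

def getClosestApproximation_alt (total : Int) (interval : Int) (subcount : Int) : Int × Int :=
  -- `abs(total) // abs(subcount)` over ints = Nat division of the natAbs's
  pvBBody total subcount
    (if 0 < interval ∧ subcount ≠ 0 then min interval ((total.natAbs / subcount.natAbs : Nat) : Int)
     else interval)
-- ===== PRECONDITION & SPEC =====
-- Pre_ = the inputs on which the Python A returns normally: for interval < 0 A returns
-- only if the very first step succeeds (otherwise it decrements forever and raises
-- RecursionError); for interval ≥ 0 CPython raises RecursionError once the number of
-- unit decrements down to the first workable interval reaches its recursion limit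
-- (measured: ≈998 decrements); Pre_ admits at most 950 decrements, a small safety
-- margin for the caller's existing stack depth — see claim.json "cites".
def Pre_getClosestApproximation (total : Int) (interval : Int) (subcount : Int) : Prop :=
  (0 ≤ interval ∧
    interval - (if subcount = 0 then 0 else min interval ((total.natAbs / subcount.natAbs : Nat) : Int)) ≤ 950)
  ∨ (interval < 0 ∧ subcount ≠ 0 ∧ (interval * subcount).natAbs ≤ total.natAbs)
instance (total : Int) (interval : Int) (subcount : Int) : Decidable (Pre_getClosestApproximation total interval subcount) := by unfold Pre_getClosestApproximation; infer_instance

def pvWitness_getClosestApproximation : Int × Int × Int := (100, 7, 2)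

def Spec_getClosestApproximation (total : Int) (interval : Int) (subcount : Int) (out : Int × Int) : Prop := out = getClosestApproximation_alt total interval subcount
instance (total : Int) (interval : Int) (subcount : Int) (out : Int × Int) : Decidable (Spec_getClosestApproximation total interval subcount out) := by unfold Spec_getClosestApproximation; infer_instance

-- ===== CLAIM =====
def Claim_equal_getClosestApproximation : Prop := ∀ (total : Int) (interval : Int) (subcount : Int), Dom_getClosestApproximation total interval subcount → Pre_getClosestApproximation total interval subcount → Spec_getClosestApproximation total interval subcount (getClosestApproximation total interval subcount)

-- ===== LEMMAS AND PROOFS =====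

lemma tdiv_eq_zero_iff (a b : Int) (hb : b ≠ 0) : a.tdiv b = 0 ↔ a.natAbs < b.natAbs := by
  rw [← Int.natAbs_eq_zero, Int.natAbs_tdiv]
  show a.natAbs / b.natAbs = 0 ↔ a.natAbs < b.natAbs
  rw [Nat.div_eq_zero_iff]
  omega

lemma body_trivial (t s j : Int) (h : j * s = 0 ∨ t.tdiv (j * s) = 0) :
    pvBBody t s j = (t, 1) := by
  rcases h with h | h <;> simp [pvBBody, h]

lemma body_step (t s j : Int) (hfi : j * s ≠ 0) (hfc : t.tdiv (j * s) ≠ 0) :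
    pvBBody t s j =
      ((t.tdiv (t.tdiv (j * s))).tdiv s *
          (if 2 * (t - t.tdiv (t.tdiv (j * s)) * t.tdiv (j * s)) > t.tdiv (j * s)
           then t.tdiv (j * s) + 1 else t.tdiv (j * s)) * s,
        (t.tdiv (t.tdiv (j * s))).tdiv s) := by
  simp [pvBBody, hfi, hfc]

-- B's jump, named for the proofs
def pvJump (t i s : Int) : Int :=
  if 0 < i ∧ s ≠ 0 then min i ((t.natAbs / s.natAbs : Nat) : Int) else i

lemma alt_eq (t i s : Int) :
    getClosestApproximation_alt t i s = pvBBody t s (pvJump t i s) := rfl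

lemma main_nonneg (t s : Int) :
    ∀ (n : Nat) (i : Int), 0 ≤ i → i.toNat = n →
      pvAGo t s i n = getClosestApproximation_alt t i s := by
  intro n
  induction n with
  | zero =>
    intro i h0 hn
    have hi : i = 0 := by omega
    subst hi
    rw [alt_eq, body_trivial t s _ (Or.inl (by simp [pvJump]))]
    simp [pvAGo]
  | succ m ih =>
    intro i h0 hn
    have hipos : 0 < i := by omega
    rw [pvAGo]
    by_cases hs : s = 0
    · -- subcount = 0: fileinterval = 0 on every step, A descends to 0
      have hz : i * s = 0 := by simp [hs]
      rw [if_neg (by omega : ¬ i = 0)]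
      simp only [hz]
      rw [ih (i - 1) (by omega) (by omega), alt_eq, alt_eq]
      rw [body_trivial t s _ (Or.inl (by simp [hs])),
          body_trivial t s _ (Or.inl (by simp [hs]))]
      simp
    · have hfi : i * s ≠ 0 := mul_ne_zero (by omega) hs
      by_cases hfc : t.tdiv (i * s) = 0
      · -- filecount = 0: ZeroDivisionError branch, A descends; B's jump is the same
        -- at i and at i-1 (both land on F = t.natAbs / s.natAbs < i)
        have hlt : t.natAbs < (i * s).natAbs := (tdiv_eq_zero_iff t (i * s) hfi).mp hfc
        have hF : t.natAbs / s.natAbs < i.natAbs := by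
          rw [Nat.div_lt_iff_lt_mul (by omega : 0 < s.natAbs)]
          calc t.natAbs < (i * s).natAbs := hlt
            _ = i.natAbs * s.natAbs := Int.natAbs_mul i s
        rw [if_neg (by omega : ¬ i = 0), if_neg hfi, if_pos hfc]
        rw [ih (i - 1) (by omega) (by omega), alt_eq, alt_eq]
        have hj : pvJump t i s = pvJump t (i - 1) s := by
          simp only [pvJump]
          have hF' : ((t.natAbs / s.natAbs : Nat) : Int) < i := by
            generalize t.natAbs / s.natAbs = F at hF; omega
          have hF0 : (0 : Int) ≤ ((t.natAbs / s.natAbs : Nat) : Int) := Int.natCast_nonneg _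
          by_cases h1 : 0 < i - 1
          · rw [if_pos ⟨hipos, hs⟩, if_pos ⟨h1, hs⟩]
            generalize ((t.natAbs / s.natAbs : Nat) : Int) = F at hF' hF0 ⊢
            omega
          · rw [if_pos ⟨hipos, hs⟩, if_neg (by omega : ¬ (0 < i - 1 ∧ s ≠ 0))]
            generalize ((t.natAbs / s.natAbs : Nat) : Int) = F at hF' hF0 ⊢
            omega
        rw [hj]
      · -- filecount ≠ 0: A returns the step value here, and B's jump keeps i
        have hle : (i * s).natAbs ≤ t.natAbs := by
          by_contra h
          exact hfc ((tdiv_eq_zero_iff t (i * s) hfi).mpr (by omega))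
        have hF : i.natAbs ≤ t.natAbs / s.natAbs := by
          rw [Nat.le_div_iff_mul_le (by omega : 0 < s.natAbs)]
          calc i.natAbs * s.natAbs = (i * s).natAbs := (Int.natAbs_mul i s).symm
            _ ≤ t.natAbs := hle
        have hj : pvJump t i s = i := by
          simp only [pvJump]
          rw [if_pos ⟨hipos, hs⟩]
          have hF' : (i : Int) ≤ ((t.natAbs / s.natAbs : Nat) : Int) := by
            generalize t.natAbs / s.natAbs = F at hF; omega
          generalize ((t.natAbs / s.natAbs : Nat) : Int) = F at hF' ⊢
          omega
        rw [if_neg (by omega : ¬ i = 0), if_neg hfi, if_neg hfc]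
        rw [alt_eq, hj, body_step t s i hfi hfc]

lemma main_neg (t s i : Int) (hi : i < 0) (hs : s ≠ 0)
    (hle : (i * s).natAbs ≤ t.natAbs) :
    pvAGo t s i 0 = getClosestApproximation_alt t i s := by
  have hfi : i * s ≠ 0 := mul_ne_zero (by omega) hs
  have hfc : ¬ t.tdiv (i * s) = 0 := by
    rw [tdiv_eq_zero_iff t (i * s) hfi]; omega
  rw [pvAGo, if_neg (by omega : ¬ i = 0), if_neg hfi, if_neg hfc]
  have hj : pvJump t i s = i := by
    simp [pvJump]; omega
  rw [alt_eq, hj, body_step t s i hfi hfc]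
-- ===== VERDICT =====
theorem getClosestApproximation_spec : Claim_equal_getClosestApproximation := by
  intro t i s _hdom hpre
  unfold Spec_getClosestApproximation getClosestApproximation
  rcases hpre with ⟨h0, _⟩ | ⟨hi, hs, hle⟩
  · exact main_nonneg t s i.toNat i h0 rfl
  · have : i.toNat = 0 := by omega
    rw [this]
    exact main_neg t s i hi hs hle
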